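-- pv_equiv track=rewrite | github.com/byeongJoo05/ProblemSolving | Python/programmers/숫자 짝꿍.py | solution
-- ===== SOURCE A (Python) =====
-- def solution(X, Y):
--     answer = ''
--     l = []
--     for i in (set(X) & set(Y)):
--         for j in range(min(X.count(i), Y.count(i))):
--             l.append(i)
--
--     l.sort(reverse=True)
--
--     if not l:
--         return "-1"
--     if l[0] == '0':
--         return "0"
--
--     answer = "".join(l)
--     return answer
-- ===== SOURCE B (Python) =====
-- def solution(X, Y):
--     cx = {}
--     for c in X:
--         cx[c] = cx.get(c, 0) + 1
--     cy = {}
--     for c in Y: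
--         cy[c] = cy.get(c, 0) + 1
--     parts = []
--     for code in range(127, -1, -1):
--         ch = chr(code)
--         parts.append(ch * min(cx.get(ch, 0), cy.get(ch, 0)))
--     s = "".join(parts)
--     if not s:
--         return "-1"
--     if s[0] == '0':
--         return "0"
--     return s
-- ===== Notes on version B (the rewrite author's own statement) =====
-- stated objective: alternative
-- what changed: Replaces A's set-intersection + repeated str.count + sort(reverse=True) pipeline by a counting sort: one counting pass per string into a dict, then a single descending sweep over the 128 ASCII codes emitting each character min(count) times, so no sort and no set intersection.
import Mathlib
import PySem

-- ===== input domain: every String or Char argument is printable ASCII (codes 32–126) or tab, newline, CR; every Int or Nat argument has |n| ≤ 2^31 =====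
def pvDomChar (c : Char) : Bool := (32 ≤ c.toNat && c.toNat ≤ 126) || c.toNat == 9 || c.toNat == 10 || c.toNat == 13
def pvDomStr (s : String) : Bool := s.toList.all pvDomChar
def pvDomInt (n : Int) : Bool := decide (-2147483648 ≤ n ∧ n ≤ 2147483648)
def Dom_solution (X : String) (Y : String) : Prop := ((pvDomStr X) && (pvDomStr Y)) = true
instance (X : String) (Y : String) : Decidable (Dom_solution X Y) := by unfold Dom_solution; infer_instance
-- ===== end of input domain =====

-- B replaces A's set-intersection + repeated str.count + sort pipeline by a counting sort:
-- count each string once into a dict, then sweep the ASCII codes 127..0 emitting each char min(count) times.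

-- ===== PORT A =====
-- 'for i in set(X) & set(Y)' appends copies of i, then l.sort(reverse=True): the sorted result
-- does not depend on the set's iteration order.  X.count(i) for a 1-char string i = char count.
def solution (X : String) (Y : String) : String :=
  let l : List Char :=
    (PySem.Set.inter (PySem.Set.ofList X.toList) (PySem.Set.ofList Y.toList)).foldl
      (fun acc i =>
        (PySem.List.pyRange 0 (min ((X.toList.count i : Int)) ((Y.toList.count i : Int))) 1).foldl
          (fun a _ => a ++ [i]) acc) []
  let ls := PySem.List.sorted l (fun x => x) true
  if ls = [] then "-1"
  else if PySem.List.pyGet? ls 0 = some '0' then "0"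
  else String.ofList ls

-- ===== PORT B =====
def solution_alt (X : String) (Y : String) : String :=
  let cx := X.toList.foldl (fun d c => d.insert c (d.getD c 0 + 1)) (PySem.Dict.empty : PySem.Dict Char Int)
  let cy := Y.toList.foldl (fun d c => d.insert c (d.getD c 0 + 1)) (PySem.Dict.empty : PySem.Dict Char Int)
  let parts : List (List Char) :=
    (PySem.List.pyRange 127 (-1) (-1)).foldl
      (fun ps code =>
        ps ++ [PySem.List.pyRepeat [Char.ofNat code.toNat]
                 (min (cx.getD (Char.ofNat code.toNat) 0) (cy.getD (Char.ofNat code.toNat) 0))]) []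
  let s := PySem.Chars.join [] parts
  if s = [] then "-1"
  else if PySem.List.pyGet? s 0 = some '0' then "0"
  else String.ofList s

-- ===== PRECONDITION & SPEC =====
def Spec_solution (X : String) (Y : String) (out : String) : Prop := out = solution_alt X Y
instance (X : String) (Y : String) (out : String) : Decidable (Spec_solution X Y out) := by unfold Spec_solution; infer_instance

-- ===== CLAIM (what is proved, stated in full; the proofs are below) =====
def Claim_equal_solution : Prop := ∀ (X : String) (Y : String), Dom_solution X Y → Spec_solution X Y (solution X Y)

-- ===== LEMMAS AND PROOFS =====

theorem chr_toNat (n : Nat) (h : n < 128) : (Char.ofNat n).toNat = n := by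
  rw [Char.toNat_ofNat, if_pos (Or.inl (by omega : n < 0xd800))]

theorem chr_inj (a b : Nat) (ha : a < 128) (hb : b < 128) (h : Char.ofNat a = Char.ofNat b) : a = b := by
  have := congrArg Char.toNat h
  rwa [chr_toNat a ha, chr_toNat b hb] at this

theorem join_nil_eq_flatten (parts : List (List Char)) : PySem.Chars.join [] parts = parts.flatten := by
  induction parts with
  | nil => rw [PySem.Chars.join_nil]; rfl
  | cons p ps ih =>
    cases ps with
    | nil => rw [PySem.Chars.join_singleton]; simp
    | cons q qs => rw [PySem.Chars.join_cons_cons, ih]; simp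

theorem count_flatMap_rep (C : List Char) (hC : C.Nodup) (m : Char → Nat) (c : Char) :
    (C.flatMap fun ch => List.replicate (m ch) ch).count c = if c ∈ C then m c else 0 := by
  induction C with
  | nil => simp
  | cons a C ih =>
    simp only [List.flatMap_cons, List.count_append, List.nodup_cons] at *
    rw [ih hC.2, List.count_replicate]
    by_cases hac : c = a
    · subst hac
      simp [hC.1]
    · simp [hac, Ne.symm hac]

theorem pairwise_ge_flatMap_rep (C : List Char) (hC : C.Pairwise (fun a b => b < a)) (m : Char → Nat) :
    (C.flatMap fun ch => List.replicate (m ch) ch).Pairwise (fun a b : Char => b ≤ a) := by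
  induction C with
  | nil => simp
  | cons a C ih =>
    simp only [List.flatMap_cons, List.pairwise_cons] at *
    rw [List.pairwise_append]
    refine ⟨?_, ih hC.2, ?_⟩
    · exact (List.pairwise_replicate).mpr (Or.inr (le_refl a))
    · intro x hx y hy
      rw [List.eq_of_mem_replicate hx]
      rw [List.mem_flatMap] at hy
      obtain ⟨ch, hch, hy⟩ := hy
      rw [List.eq_of_mem_replicate hy]
      exact le_of_lt (hC.1 ch hch)

-- the common multiplicity
def pvM (X Y : String) (c : Char) : Nat := min (X.toList.count c) (Y.toList.count c)

-- the descending list of all chars with code < 128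
def pvC : List Char := (PySem.List.pyRange 0 128 1).reverse.map (fun k => Char.ofNat k.toNat)

theorem mem_pvC (c : Char) : c ∈ pvC ↔ c.toNat < 128 := by
  unfold pvC
  simp only [List.mem_map, List.mem_reverse, PySem.List.mem_pyRange_one]
  constructor
  · rintro ⟨k, ⟨hk0, hk1⟩, rfl⟩
    rw [chr_toNat k.toNat (by omega)]
    omega
  · intro h
    refine ⟨(c.toNat : Int), ⟨by omega, by exact_mod_cast h⟩, ?_⟩
    simp only [Int.toNat_natCast]
    exact Char.ofNat_toNat c

theorem nodup_pvC : pvC.Nodup := by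
  unfold pvC
  refine List.Nodup.map_on ?_ (List.nodup_reverse.mpr (PySem.List.nodup_pyRange_one 0 128))
  intro x hx y hy h
  simp only [List.mem_reverse, PySem.List.mem_pyRange_one] at hx hy
  have := chr_inj x.toNat y.toNat (by omega) (by omega) h
  omega

theorem pairwise_pvC : pvC.Pairwise (fun a b => b < a) := by
  unfold pvC
  rw [List.pairwise_map, List.pairwise_reverse]
  refine List.Pairwise.imp_of_mem ?_ (PySem.List.pairwise_lt_pyRange_one 0 128)
  intro a b ha hb hab
  simp only [PySem.List.mem_pyRange_one] at ha hb
  rw [Char.lt_def, UInt32.lt_iff_toNat_lt]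
  show (Char.ofNat a.toNat).toNat < (Char.ofNat b.toNat).toNat
  rw [chr_toNat a.toNat (by omega), chr_toNat b.toNat (by omega)]
  omega

-- A's multiset of chars: flatMap over the set intersection
theorem lA_eq (X Y : String) :
    ((PySem.Set.inter (PySem.Set.ofList X.toList) (PySem.Set.ofList Y.toList)).foldl
      (fun acc i =>
        (PySem.List.pyRange 0 (min ((X.toList.count i : Int)) ((Y.toList.count i : Int))) 1).foldl
          (fun a _ => a ++ [i]) acc) [])
    = (PySem.Set.inter (PySem.Set.ofList X.toList) (PySem.Set.ofList Y.toList)).flatMap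
        (fun i => List.replicate (pvM X Y i) i) := by
  have h1 : ∀ (acc : List Char) (i : Char),
      (PySem.List.pyRange 0 (min ((X.toList.count i : Int)) ((Y.toList.count i : Int))) 1).foldl
        (fun a _ => a ++ [i]) acc = acc ++ List.replicate (pvM X Y i) i := by
    intro acc i
    rw [PySem.List.foldl_append_singleton_eq_map (f := fun _ => i)]
    congr 1
    rw [List.map_const', PySem.List.length_pyRange_one]
    congr 1
    unfold pvM
    omega
  have h2 := PySem.List.foldl_congr_mem
      (l := PySem.Set.inter (PySem.Set.ofList X.toList) (PySem.Set.ofList Y.toList))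
      (init := ([] : List Char))
      (f := fun acc i =>
        (PySem.List.pyRange 0 (min ((X.toList.count i : Int)) ((Y.toList.count i : Int))) 1).foldl
          (fun a _ => a ++ [i]) acc)
      (g := fun acc i => acc ++ List.replicate (pvM X Y i) i)
      (fun acc x _ => h1 acc x)
  rw [h2, PySem.List.foldl_append_eq_flatMap, List.nil_append]

-- B's char list: flatMap over pvC
theorem sB_eq (X Y : String) :
    (PySem.Chars.join []
      ((PySem.List.pyRange 127 (-1) (-1)).foldl
        (fun ps code =>
          ps ++ [PySem.List.pyRepeat [Char.ofNat code.toNat]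
                   (min ((X.toList.foldl (fun d c => d.insert c (d.getD c 0 + 1)) (PySem.Dict.empty : PySem.Dict Char Int)).getD (Char.ofNat code.toNat) 0)
                        ((Y.toList.foldl (fun d c => d.insert c (d.getD c 0 + 1)) (PySem.Dict.empty : PySem.Dict Char Int)).getD (Char.ofNat code.toNat) 0))]) []))
    = pvC.flatMap (fun ch => List.replicate (pvM X Y ch) ch) := by
  rw [PySem.List.foldl_append_singleton_eq_map, List.nil_append]
  rw [join_nil_eq_flatten, ← List.flatMap_def]
  rw [PySem.List.pyRange_neg_one_eq_reverse]
  norm_num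
  unfold pvC
  rw [List.flatMap_map]
  refine List.flatMap_congr ?_
  intro code _
  simp only [PySem.Dict.getD_foldl_insert_add_one, PySem.Dict.getD_empty, zero_add]
  congr 1
  unfold pvM
  omega

theorem count_lA (X Y : String) (c : Char) :
    ((PySem.Set.inter (PySem.Set.ofList X.toList) (PySem.Set.ofList Y.toList)).flatMap
      (fun i => List.replicate (pvM X Y i) i)).count c = pvM X Y c := by
  have hnd : (PySem.Set.inter (PySem.Set.ofList X.toList) (PySem.Set.ofList Y.toList)).Nodup :=
    List.Nodup.filter _ (PySem.Set.nodup_ofList _)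
  rw [count_flatMap_rep _ hnd]
  by_cases h : c ∈ PySem.Set.inter (PySem.Set.ofList X.toList) (PySem.Set.ofList Y.toList)
  · simp [h]
  · rw [if_neg h]
    rw [PySem.Set.mem_inter, PySem.Set.mem_ofList, PySem.Set.mem_ofList] at h
    unfold pvM
    rcases not_and_or.mp h with h' | h' <;>
      simp [List.count_eq_zero_of_not_mem h']

theorem count_sB (X Y : String) (hX : pvDomStr X = true) (c : Char) :
    (pvC.flatMap (fun ch => List.replicate (pvM X Y ch) ch)).count c = pvM X Y c := by
  rw [count_flatMap_rep _ nodup_pvC]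
  by_cases h : c ∈ pvC
  · simp [h]
  · rw [if_neg h]
    rw [mem_pvC] at h
    have hc : c ∉ X.toList := by
      intro hmem
      have := List.all_eq_true.mp hX c hmem
      unfold pvDomChar at this
      simp only [Bool.or_eq_true, Bool.and_eq_true, decide_eq_true_eq, beq_iff_eq] at this
      omega
    unfold pvM
    simp [List.count_eq_zero_of_not_mem hc]

theorem core (X Y : String) (hX : pvDomStr X = true) :
    PySem.List.sorted
      ((PySem.Set.inter (PySem.Set.ofList X.toList) (PySem.Set.ofList Y.toList)).foldl
        (fun acc i =>
          (PySem.List.pyRange 0 (min ((X.toList.count i : Int)) ((Y.toList.count i : Int))) 1).foldl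
            (fun a _ => a ++ [i]) acc) []) (fun x => x) true
    = pvC.flatMap (fun ch => List.replicate (pvM X Y ch) ch) := by
  rw [lA_eq]
  set lA := (PySem.Set.inter (PySem.Set.ofList X.toList) (PySem.Set.ofList Y.toList)).flatMap
      (fun i => List.replicate (pvM X Y i) i) with hlA
  set sB := pvC.flatMap (fun ch => List.replicate (pvM X Y ch) ch) with hsB
  have hperm : lA.Perm sB := by
    rw [List.perm_iff_count]
    intro a
    rw [hlA, hsB, count_lA, count_sB X Y hX]
  refine PySem.List.eq_of_perm_of_pairwise_le_of_injective
    (key := fun c : Char => -((c.toNat : Int))) ?_ ?_ ?_ ?_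
  · intro a b h
    simp only [neg_inj, Nat.cast_inj] at h
    calc a = Char.ofNat a.toNat := (Char.ofNat_toNat a).symm
      _ = Char.ofNat b.toNat := by rw [h]
      _ = b := Char.ofNat_toNat b
  · exact (PySem.List.sorted_perm lA (fun x => x) true).trans hperm
  · have := PySem.List.sorted_pairwise_rev lA (fun x => x)
    refine this.imp ?_
    intro a b h
    simp only [neg_le_neg_iff, Nat.cast_le]
    exact h
  · have := pairwise_ge_flatMap_rep pvC pairwise_pvC (pvM X Y)
    refine this.imp ?_
    intro a b h
    simp only [neg_le_neg_iff, Nat.cast_le]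
    exact h

-- ===== VERDICT (by name: the statement is the Claim_ definition above) =====
theorem solution_spec : Claim_equal_solution := by
  intro X Y hdom
  have hX : pvDomStr X = true := by
    unfold Dom_solution at hdom
    simp only [Bool.and_eq_true] at hdom
    exact hdom.1
  show solution X Y = solution_alt X Y
  simp only [solution, solution_alt]
  rw [core X Y hX, sB_eq]
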